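-- pv_equiv track=rewrite | github.com/pypi-data/pypi-mirror-342 | packages/kcpp/kcpp-0.7.tar.gz/kcpp-0.7/src/kcpp/core/types.py | sparse_line_offsets
-- ===== SOURCE A (Python) =====
-- def line_offsets_gen(raw):
--     for n, c in enumerate(raw):
--         if c == 10:  # '\n'
--             yield n + 1
--         elif c == 13:  # '\r'
--             if n + 1 == len(raw) or raw[n + 1] != 10:
--                 yield n + 1
--
-- def sparse_line_offsets(raw, bom_length, min_step):
--     '''Return a sparse sorted list of (line_offset, line_number) pairs.  The list always
--     starts with (0,1) or (3, 1) for a text file with a UTF-8 BOM.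
--     '''
--     result = [(bom_length, 1)]
--
--     beyond = min_step
--     line_number = 1
--     for line_number, offset in enumerate(line_offsets_gen(raw), start=2):
--         if offset >= beyond:
--             result.append((offset, line_number))
--             beyond = offset + min_step
--
--     return result
-- ===== SOURCE B (Python) =====
-- def sparse_line_offsets(raw, bom_length, min_step):
--     '''Return a sparse sorted list of (line_offset, line_number) pairs.  The list always
--     starts with (0,1) or (3, 1) for a text file with a UTF-8 BOM.
--     '''
--     # Pass 1: collect every break offset ('\n', or a bare '\r' not followed by '\n');
--     # the offset at index k starts line k + 2, and the list is strictly increasing.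
--     offs = []
--     n = len(raw)
--     i = 0
--     while i < n:
--         c = raw[i]
--         if c == 10:
--             offs.append(i + 1)
--         elif c == 13 and (i + 1 == n or raw[i + 1] != 10):
--             offs.append(i + 1)
--         i += 1
--     # Pass 2: instead of scanning every break, binary-search (offs is sorted) for the
--     # first break offset >= the running threshold, jumping over the rejected ones.
--     result = [(bom_length, 1)]
--     beyond = min_step
--     k = 0
--     while True:
--         lo, hi = k, len(offs)
--         while lo < hi:
--             mid = (lo + hi) // 2
--             if offs[mid] >= beyond:
--                 hi = mid
--             else:
--                 lo = mid + 1
--         if lo == len(offs):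
--             break
--         off = offs[lo]
--         result.append((off, lo + 2))
--         beyond = off + min_step
--         k = lo + 1
--     return result
-- ===== Notes on version B (the rewrite author's own statement) =====
-- stated objective: alternative
-- what changed: B first materialises the sorted list of all break offsets, then selects the sparse subset by repeated binary search for the first offset >= the running threshold (jumping over rejected breaks, line number recovered from the index), instead of A's fused lazy generator with a linear threshold scan.
import Mathlib
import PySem

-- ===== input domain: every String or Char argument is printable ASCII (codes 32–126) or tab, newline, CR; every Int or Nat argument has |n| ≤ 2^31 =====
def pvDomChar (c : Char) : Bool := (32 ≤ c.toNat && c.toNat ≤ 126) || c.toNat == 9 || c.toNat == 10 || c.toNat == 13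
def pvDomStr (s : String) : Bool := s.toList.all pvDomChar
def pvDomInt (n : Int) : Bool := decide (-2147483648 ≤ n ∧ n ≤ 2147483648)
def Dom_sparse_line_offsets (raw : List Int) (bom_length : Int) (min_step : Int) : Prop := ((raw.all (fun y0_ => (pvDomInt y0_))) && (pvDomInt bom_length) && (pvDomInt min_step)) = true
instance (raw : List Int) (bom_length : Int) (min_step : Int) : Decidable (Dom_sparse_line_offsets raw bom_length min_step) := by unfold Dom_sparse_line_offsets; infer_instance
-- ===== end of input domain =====

-- B materialises the sorted break-offset list and selects the sparse subset by repeated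
-- binary search for the first offset >= the running threshold; alternative decomposition.
-- ===== PORT A =====
-- line_offsets_gen: structural recursion over the remaining suffix of raw with the running
-- index n; `rest.length == 0` is `n + 1 == len(raw)` and `rest.headD 0` is `raw[n+1]`
-- (exact: it is only consulted when n + 1 < len(raw), just like Python's short-circuit `or`).
def line_offsets_gen (raw : List Int) (n : Nat) : List Int :=
  match raw with
  | [] => []
  | c :: rest =>
    if c == 10 then ((n : Int) + 1) :: line_offsets_gen rest (n + 1)
    else if c == 13 then
      if rest.length == 0 || rest.headD 0 != 10 then
        ((n : Int) + 1) :: line_offsets_gen rest (n + 1)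
      else line_offsets_gen rest (n + 1)
    else line_offsets_gen rest (n + 1)

-- the `for line_number, offset in enumerate(..., start=2)` loop: line_number carried as an
-- argument starting at 2; the appends to `result` become the conses of the produced list.
def sparse_loop (min_step : Int) (offsets : List Int) (line_number beyond : Int) : List (Int × Int) :=
  match offsets with
  | [] => []
  | offset :: rest =>
    if offset ≥ beyond then (offset, line_number) :: sparse_loop min_step rest (line_number + 1) (offset + min_step)
    else sparse_loop min_step rest (line_number + 1) beyond

def sparse_line_offsets (raw : List Int) (bom_length : Int) (min_step : Int) : List (Int × Int) :=
  (bom_length, 1) :: sparse_loop min_step (line_offsets_gen raw 0) 2 min_step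

-- ===== PORT B =====
-- Pass 1 of Source B (the `while i < n` index loop): structural recursion over the suffix with
-- the running index i; `raw[i]` is the head, `rest.length == 0` is `i + 1 == n` and
-- `rest.headD 0` is `raw[i+1]` (consulted only when i + 1 < n, like Python's short circuit).
def alt_offs (raw : List Int) (i : Nat) : List Int :=
  match raw with
  | [] => []
  | c :: rest =>
    if c == 10 then ((i : Int) + 1) :: alt_offs rest (i + 1)
    else if c == 13 && (rest.length == 0 || rest.headD 0 != 10) then
      ((i : Int) + 1) :: alt_offs rest (i + 1)
    else alt_offs rest (i + 1)

-- the inner `while lo < hi` binary search of Source B; offs[mid] is always in range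
-- (lo ≤ mid < hi ≤ len(offs)), so `getD … 0` is exact for Python's offs[mid].  The loop
-- is total because hi - lo shrinks every iteration; `fuel = hi - lo` is exactly that
-- bound made structural (a totality guard only, never reached as 0 while lo < hi).
def alt_bsearch_go (offs : List Int) (beyond : Int) : Nat → Nat → Nat → Nat
  | 0, lo, _ => lo
  | fuel + 1, lo, hi =>
    if lo < hi then
      let mid := (lo + hi) / 2
      if offs.getD mid 0 ≥ beyond then alt_bsearch_go offs beyond fuel lo mid
      else alt_bsearch_go offs beyond fuel (mid + 1) hi
    else lo

def alt_bsearch (offs : List Int) (beyond : Int) (lo hi : Nat) : Nat :=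
  alt_bsearch_go offs beyond (hi - lo) lo hi

-- the outer `while True` loop of Source B: state (beyond, k); each iteration binary-searches,
-- breaks at the end of offs, or appends (offs[lo], lo + 2) (append becomes cons).  Each
-- iteration moves k past lo < len(offs), so `fuel = len(offs) + 1` iterations suffice.
def alt_select_go (offs : List Int) (min_step : Int) : Nat → Int → Nat → List (Int × Int)
  | 0, _, _ => []
  | fuel + 1, beyond, k =>
    let lo := alt_bsearch offs beyond k offs.length
    if lo < offs.length then
      (offs.getD lo 0, (lo : Int) + 2) :: alt_select_go offs min_step fuel (offs.getD lo 0 + min_step) (lo + 1)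
    else []

def sparse_line_offsets_alt (raw : List Int) (bom_length : Int) (min_step : Int) : List (Int × Int) :=
  (bom_length, 1) :: alt_select_go (alt_offs raw 0) min_step ((alt_offs raw 0).length + 1) min_step 0

-- ===== PRECONDITION & SPEC =====
def Spec_sparse_line_offsets (raw : List Int) (bom_length : Int) (min_step : Int) (out : List (Int × Int)) : Prop := out = sparse_line_offsets_alt raw bom_length min_step
instance (raw : List Int) (bom_length : Int) (min_step : Int) (out : List (Int × Int)) : Decidable (Spec_sparse_line_offsets raw bom_length min_step out) := by unfold Spec_sparse_line_offsets; infer_instance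

-- ===== CLAIM (what is proved, stated in full; the proofs are below) =====
def Claim_equal_sparse_line_offsets : Prop := ∀ (raw : List Int) (bom_length : Int) (min_step : Int), Dom_sparse_line_offsets raw bom_length min_step → Spec_sparse_line_offsets raw bom_length min_step (sparse_line_offsets raw bom_length min_step)

-- ===== LEMMAS AND PROOFS =====
-- A's generator and B's pass 1 produce the same break-offset list.
theorem gen_eq_offs (raw : List Int) : ∀ i, line_offsets_gen raw i = alt_offs raw i := by
  induction raw with
  | nil => intro i; rfl
  | cons c rest ih =>
    intro i
    simp only [line_offsets_gen, alt_offs]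
    by_cases h10 : c = 10
    · simp [h10, ih]
    · by_cases h13 : c = 13
      · by_cases hl : (rest.length == 0 || rest.headD 0 != 10) = true
        · simp [h13, ih]
        · simp only [Bool.not_eq_true] at hl
          simp [h13, ih]
      · simp [h10, h13, ih]

-- every break offset produced from index i onwards exceeds i.
theorem offs_bound (raw : List Int) : ∀ i x, x ∈ alt_offs raw i → (i : Int) < x := by
  induction raw with
  | nil => intro i x hx; simp [alt_offs] at hx
  | cons c rest ih =>
    intro i x hx
    simp only [alt_offs] at hx
    split_ifs at hx with h1 h2
    · rcases List.mem_cons.1 hx with h | h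
      · subst h; omega
      · have := ih (i + 1) x h; omega
    · rcases List.mem_cons.1 hx with h | h
      · subst h; omega
      · have := ih (i + 1) x h; omega
    · have := ih (i + 1) x hx; omega

-- the break-offset list is strictly increasing.
theorem offs_sorted (raw : List Int) : ∀ i, (alt_offs raw i).Pairwise (· < ·) := by
  induction raw with
  | nil => intro i; simp [alt_offs]
  | cons c rest ih =>
    intro i
    simp only [alt_offs]
    split_ifs with h1 h2 <;>
      try exact ih (i + 1)
    all_goals
      refine List.pairwise_cons.2 ⟨fun x hx => ?_, ih (i + 1)⟩
      have := offs_bound rest (i + 1) x hx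
      push_cast at this ⊢; omega

-- monotone indexing derived from sortedness.
theorem offs_mono (offs : List Int) (hs : offs.Pairwise (· < ·)) :
    ∀ j1 j2, j1 ≤ j2 → j2 < offs.length → offs.getD j1 0 ≤ offs.getD j2 0 := by
  intro j1 j2 hle hlt
  have h1 : j1 < offs.length := Nat.lt_of_le_of_lt hle hlt
  rw [offs.getD_eq_getElem 0 h1, offs.getD_eq_getElem 0 hlt]
  rcases Nat.lt_or_eq_of_le hle with h | h
  · exact le_of_lt (List.pairwise_iff_getElem.1 hs j1 j2 h1 hlt h)
  · subst h; exact le_refl _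

-- the binary search never returns below lo.
theorem alt_bsearch_go_ge (offs : List Int) (beyond : Int) :
    ∀ fuel lo hi, lo ≤ alt_bsearch_go offs beyond fuel lo hi := by
  intro fuel
  induction fuel with
  | zero => intro lo hi; exact le_refl _
  | succ fuel ih =>
    intro lo hi
    simp only [alt_bsearch_go]
    split_ifs with h1 h2
    · exact ih lo _
    · exact le_trans (by omega) (ih ((lo + hi) / 2 + 1) hi)
    · exact le_refl _

theorem alt_bsearch_ge (offs : List Int) (beyond : Int) (lo hi : Nat) :
    lo ≤ alt_bsearch offs beyond lo hi :=
  alt_bsearch_go_ge offs beyond (hi - lo) lo hi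

-- binary-search specification, by induction on the fuel (sufficient when hi - lo ≤ fuel):
-- the result r satisfies lo ≤ r ≤ hi, everything in [lo, r) is below the threshold, and
-- offs[r] ≥ beyond when r < hi.
theorem alt_bsearch_go_spec (offs : List Int) (beyond : Int)
    (hs : offs.Pairwise (· < ·)) :
    ∀ fuel lo hi, hi - lo ≤ fuel → hi ≤ offs.length →
      (lo ≤ hi → alt_bsearch_go offs beyond fuel lo hi ≤ hi) ∧
      (∀ j, lo ≤ j → j < alt_bsearch_go offs beyond fuel lo hi → offs.getD j 0 < beyond) ∧
      (alt_bsearch_go offs beyond fuel lo hi < hi → offs.getD (alt_bsearch_go offs beyond fuel lo hi) 0 ≥ beyond) := by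
  intro fuel
  induction fuel with
  | zero =>
    intro lo hi hf hhi
    simp only [alt_bsearch_go]
    exact ⟨fun hle => by omega, fun j h1 h2 => by omega, fun h => by omega⟩
  | succ fuel ih =>
    intro lo hi hf hhi
    simp only [alt_bsearch_go]
    split_ifs with h1 h2
    · obtain ⟨ih1, ih2, ih3⟩ := ih lo ((lo + hi) / 2) (by omega) (by omega)
      refine ⟨fun _ => by have := ih1 (by omega); omega, ih2, fun hr => ?_⟩
      rcases Nat.lt_or_eq_of_le (ih1 (by omega)) with h | h
      · exact ih3 h
      · rw [h]; exact h2
    · obtain ⟨ih1, ih2, ih3⟩ := ih ((lo + hi) / 2 + 1) hi (by omega) hhi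
      have hge' := alt_bsearch_go_ge offs beyond fuel ((lo + hi) / 2 + 1) hi
      refine ⟨fun _ => ih1 (by omega), fun j hj1 hj2 => ?_, ih3⟩
      by_cases hjm : (lo + hi) / 2 + 1 ≤ j
      · exact ih2 j hjm hj2
      · have : offs.getD j 0 ≤ offs.getD ((lo + hi) / 2) 0 :=
          offs_mono offs hs j ((lo + hi) / 2) (by omega) (by omega)
        omega
    · exact ⟨fun _ => by omega, fun j hj1 hj2 => by omega, fun h => absurd h h1⟩

theorem alt_bsearch_spec (offs : List Int) (beyond : Int)
    (hs : offs.Pairwise (· < ·)) (lo hi : Nat) (hhi : hi ≤ offs.length) :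
    (lo ≤ hi → alt_bsearch offs beyond lo hi ≤ hi) ∧
    (∀ j, lo ≤ j → j < alt_bsearch offs beyond lo hi → offs.getD j 0 < beyond) ∧
    (alt_bsearch offs beyond lo hi < hi → offs.getD (alt_bsearch offs beyond lo hi) 0 ≥ beyond) :=
  alt_bsearch_go_spec offs beyond hs (hi - lo) lo hi (le_refl _) hhi

-- skipping rejected breaks: if every index in [k, r) is below the threshold, A's linear
-- scan starting at k reaches index r unchanged (line number follows the index).
theorem sparse_skip (ms : Int) (offs : List Int) :
    ∀ d k r, r - k = d → k ≤ r → r ≤ offs.length →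
      (∀ j, k ≤ j → j < r → offs.getD j 0 < beyond') →
      sparse_loop ms (offs.drop k) ((k : Int) + 2) beyond'
        = sparse_loop ms (offs.drop r) ((r : Int) + 2) beyond' := by
  intro d
  induction d with
  | zero =>
    intro k r h1 h2 _ _
    obtain rfl : k = r := (by omega : k = r)
    rfl
  | succ d ih =>
    intro k r h1 h2 h3 h4
    have hk : k < offs.length := by omega
    rw [List.drop_eq_getElem_cons hk]
    have hfail : ¬ offs[k] ≥ beyond' := by
      have := h4 k (le_refl k) (by omega)
      rw [offs.getD_eq_getElem 0 hk] at this; omega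
    simp only [sparse_loop, if_neg hfail]
    have : ((k : Int) + 2) + 1 = ((k + 1 : Nat) : Int) + 2 := by push_cast; ring
    rw [this, ih (k + 1) r (by omega) (by omega) h3 (fun j hj1 hj2 => h4 j (by omega) hj2)]

-- main loop equivalence: A's fused linear scan over the suffix from index k equals B's
-- binary-search selection with lower bound k, for any sufficient fuel.
theorem select_eq (ms : Int) (offs : List Int) (hs : offs.Pairwise (· < ·)) :
    ∀ fuel k beyond, offs.length - k < fuel →
      sparse_loop ms (offs.drop k) ((k : Int) + 2) beyond
        = alt_select_go offs ms fuel beyond k := by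
  intro fuel
  induction fuel with
  | zero => intro k beyond hf; omega
  | succ fuel ih =>
    intro k beyond hf
    simp only [alt_select_go]
    set lo := alt_bsearch offs beyond k offs.length with hlo
    split_ifs with hlt
    · obtain ⟨hb1, hb2, hb3⟩ := alt_bsearch_spec offs beyond hs k offs.length (le_refl _)
      have hk := alt_bsearch_ge offs beyond k offs.length
      rw [sparse_skip ms offs (lo - k) k lo rfl hk (by omega) hb2]
      rw [List.drop_eq_getElem_cons hlt]
      have hacc : offs[lo] ≥ beyond := by
        have := hb3 hlt; rw [offs.getD_eq_getElem 0 hlt] at this; exact this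
      simp only [sparse_loop, if_pos hacc]
      rw [offs.getD_eq_getElem 0 hlt]
      have : ((lo : Int) + 2) + 1 = ((lo + 1 : Nat) : Int) + 2 := by push_cast; ring
      rw [this, ih (lo + 1) (offs[lo] + ms) (by omega)]
    · by_cases hk : k ≤ offs.length
      · obtain ⟨hb1, hb2, hb3⟩ := alt_bsearch_spec offs beyond hs k offs.length (le_refl _)
        have hkl := alt_bsearch_ge offs beyond k offs.length
        have hend : lo = offs.length := by have := hb1 hk; omega
        rw [sparse_skip ms offs (lo - k) k lo rfl hkl (by omega) hb2, hend, List.drop_length]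
        rfl
      · rw [List.drop_of_length_le (by omega)]
        rfl

-- ===== VERDICT (by name: the statement is the Claim_ definition above) =====
theorem sparse_line_offsets_spec : Claim_equal_sparse_line_offsets := by
  intro raw bom_length min_step _
  unfold Spec_sparse_line_offsets sparse_line_offsets sparse_line_offsets_alt
  rw [gen_eq_offs raw 0]
  have h := select_eq min_step (alt_offs raw 0) (offs_sorted raw 0)
      ((alt_offs raw 0).length + 1) 0 min_step (by omega)
  simpa using h
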